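-- pv_equiv track=rewrite | github.com/PennyroyalTea/bioinformatics-homeworks | homework_2022.02.25/1.8.10.py | d_neighbours
-- ===== SOURCE A (Python) =====
-- def d_neighbours(s, d):
--     if d == 0 or len(s) == 0:
--         return [s]
--     res = []
--     for c0 in ['G', 'T', 'C', 'A']:
--         if c0 == s[0]:
--             res.extend(list(map(lambda res: c0 + res, d_neighbours(s[1:], d))))
--         else:
--             res.extend(list(map(lambda res: c0 + res, d_neighbours(s[1:], d - 1))))
--     return res
-- ===== SOURCE B (Python) =====
-- def d_neighbours(s, d):
--     # Iterative left-to-right expansion: ordered worklist of done strings and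
--     # (prefix, remaining_d) partials, expanded in place position by position.
--     items = [('P', '', d)]
--     for i in range(len(s)):
--         nxt = []
--         for it in items:
--             if it[0] == 'D':
--                 nxt.append(it)
--             else:
--                 _, p, r = it
--                 if r == 0:
--                     nxt.append(('D', p + s[i:]))
--                 else:
--                     for c in 'GTCA':
--                         nxt.append(('P', p + c, r if c == s[i] else r - 1))
--         items = nxt
--     return [it[1] for it in items]
-- ===== Notes on version B (the rewrite author's own statement) =====
-- stated objective: alternative
-- what changed: Replaces A's suffix recursion (recurse on s[1:], prepend c0 to every returned string) with an iterative left-to-right pass over the string that expands an ordered worklist of (prefix, remaining_d) partials, finishing a partial by appending the unchanged suffix when its budget hits 0.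
import Mathlib
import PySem

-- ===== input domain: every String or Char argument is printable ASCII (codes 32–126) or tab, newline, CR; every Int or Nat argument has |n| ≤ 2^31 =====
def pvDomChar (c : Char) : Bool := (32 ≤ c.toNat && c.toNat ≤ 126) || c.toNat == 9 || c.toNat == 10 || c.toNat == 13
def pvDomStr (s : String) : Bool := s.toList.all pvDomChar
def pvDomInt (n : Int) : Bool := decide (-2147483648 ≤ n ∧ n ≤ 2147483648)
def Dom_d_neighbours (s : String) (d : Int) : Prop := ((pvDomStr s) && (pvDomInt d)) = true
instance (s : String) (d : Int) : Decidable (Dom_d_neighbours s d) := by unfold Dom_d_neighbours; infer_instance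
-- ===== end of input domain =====

-- B rebuilds the same list iteratively, left to right over the string, with an
-- ordered worklist of (prefix, remaining_d) partials instead of A's recursion
-- on the suffix (objective: alternative decomposition, same cost).

-- ===== PORT A =====
-- A's recursion, over the string as a list of characters (strings rebuilt at the boundary).
def dnA : List Char → Int → List (List Char)
  | cs, d =>
    if d == 0 then [cs] else
    match cs with
    | [] => [cs]
    | c :: rest =>
      (['G', 'T', 'C', 'A'] : List Char).foldl
        (fun res c0 =>
          if c0 == c then
            res ++ (dnA rest d).map (fun r => c0 :: r)
          else
            res ++ (dnA rest (d - 1)).map (fun r => c0 :: r))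
        []

def d_neighbours (s : String) (d : Int) : List String :=
  (dnA s.toList d).map String.mk

-- ===== PORT B =====
-- an item of B's worklist: a completed string, or a partial (prefix, remaining d)
inductive BItem : Type
  | D : List Char → BItem
  | P : List Char → Int → BItem
deriving DecidableEq, Repr

-- the inner 'for it in items' body: expand one item at position with char c, suffix rest
def expandB (c : Char) (rest : List Char) (nxt : List BItem) (it : BItem) : List BItem :=
  match it with
  | .D s => nxt ++ [.D s]
  | .P p r =>
    if r == 0 then nxt ++ [.D (p ++ (c :: rest))]
    else
      (['G', 'T', 'C', 'A'] : List Char).foldl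
        (fun nxt c0 => nxt ++ [.P (p ++ [c0]) (if c0 == c then r else r - 1)]) nxt

-- the 'for i in range(len(s))' loop, driven by the remaining suffix
def loopB : List Char → List BItem → List BItem
  | [], items => items
  | c :: rest, items => loopB rest (items.foldl (expandB c rest) [])

def bitemStr : BItem → List Char
  | .D s => s
  | .P p _ => p

def d_neighbours_alt (s : String) (d : Int) : List String :=
  (loopB s.toList [.P [] d]).map (fun it => String.mk (bitemStr it))

-- ===== PRECONDITION & SPEC =====
def Spec_d_neighbours (s : String) (d : Int) (out : List String) : Prop := out = d_neighbours_alt s d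
instance (s : String) (d : Int) (out : List String) : Decidable (Spec_d_neighbours s d out) := by unfold Spec_d_neighbours; infer_instance

-- ===== CLAIM (what is proved, stated in full; the proofs are below) =====
def Claim_equal_d_neighbours : Prop := ∀ (s : String) (d : Int), Dom_d_neighbours s d → Spec_d_neighbours s d (d_neighbours s d)

-- ===== LEMMAS AND PROOFS =====

-- meaning of one worklist item, relative to the remaining suffix
def bsem (cs : List Char) : BItem → List (List Char)
  | .D s => [s]
  | .P p r => (dnA cs r).map (fun x => p ++ x)

theorem expandB_flatMap (c : Char) (rest : List Char) (it : BItem) (nxt : List BItem) :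
    expandB c rest nxt it = nxt ++ expandB c rest [] it := by
  cases it with
  | D s => simp [expandB]
  | P p r =>
    simp only [expandB]
    split
    · simp
    · rw [PySem.List.foldl_append_eq_flatMap, PySem.List.foldl_append_eq_flatMap]
      simp

theorem step_flatMap (c : Char) (rest : List Char) (items : List BItem) :
    items.foldl (expandB c rest) [] = items.flatMap (expandB c rest []) := by
  rw [show items.foldl (expandB c rest) [] =
      items.foldl (fun acc x => acc ++ expandB c rest [] x) [] from
    PySem.List.foldl_congr_mem _ _ _ _ (fun acc x _ => expandB_flatMap c rest x acc)]
  rw [PySem.List.foldl_append_eq_flatMap]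
  simp

theorem dnA_cons (c : Char) (rest : List Char) (d : Int) (hd : d ≠ 0) :
    dnA (c :: rest) d =
      (['G', 'T', 'C', 'A'] : List Char).flatMap
        (fun c0 => (dnA rest (if c0 == c then d else d - 1)).map (fun r => c0 :: r)) := by
  rw [dnA, if_neg (show ¬ (d == 0) = true by simpa using hd)]
  rw [show ((['G', 'T', 'C', 'A'] : List Char).foldl
      (fun res c0 =>
        if c0 == c then res ++ (dnA rest d).map (fun r => c0 :: r)
        else res ++ (dnA rest (d - 1)).map (fun r => c0 :: r)) []) =
      (['G', 'T', 'C', 'A'] : List Char).foldl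
        (fun res c0 => res ++ (dnA rest (if c0 == c then d else d - 1)).map (fun r => c0 :: r)) []
    from PySem.List.foldl_congr_mem _ _ _ _ (by intro acc c0 _; by_cases h : c0 == c <;> simp [h])]
  rw [PySem.List.foldl_append_eq_flatMap]
  simp

-- one item expanded at one position keeps its meaning
theorem expandB_sem (c : Char) (rest : List Char) (it : BItem) :
    (expandB c rest [] it).flatMap (bsem rest) = bsem (c :: rest) it := by
  cases it with
  | D s => simp [expandB, bsem]
  | P p r =>
    by_cases h : r = 0
    · subst h
      simp [expandB, bsem, dnA]
    · simp only [expandB, if_neg (show ¬ (r == 0) = true by simpa using h)]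
      rw [PySem.List.foldl_append_eq_flatMap]
      simp only [List.nil_append, List.flatMap_assoc]
      rw [show (bsem (c :: rest) (BItem.P p r)) =
        (['G','T','C','A'] : List Char).flatMap
          (fun c0 => ((dnA rest (if c0 == c then r else r - 1)).map (fun x => c0 :: x)).map
            (fun x => p ++ x)) from by
          simp only [bsem, dnA_cons c rest r h, List.map_flatMap]]
      refine List.flatMap_congr ?_
      intro c0 _
      simp [bsem, List.map_map, Function.comp]

-- the main invariant: the loop's output is the concatenation of the meanings
-- of the incoming items
theorem loopB_sem : ∀ (cs : List Char) (items : List BItem),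
    (loopB cs items).map bitemStr = items.flatMap (bsem cs) := by
  intro cs
  induction cs with
  | nil =>
    intro items
    induction items with
    | nil => simp [loopB]
    | cons it t ih =>
      cases it with
      | D s =>
        simp only [loopB] at ih ⊢
        simp [bsem, bitemStr, ih]
      | P p r =>
        simp only [loopB] at ih ⊢
        simp [bsem, bitemStr, dnA, ih]
  | cons c rest ih =>
    intro items
    show (loopB rest (items.foldl (expandB c rest) [])).map bitemStr = _
    rw [ih, step_flatMap, List.flatMap_assoc]
    exact List.flatMap_congr (fun it _ => expandB_sem c rest it)

-- ===== VERDICT (by name: the statement is the Claim_ definition above) =====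
theorem d_neighbours_spec : Claim_equal_d_neighbours := by
  intro s d _
  show d_neighbours s d = d_neighbours_alt s d
  unfold d_neighbours d_neighbours_alt
  rw [show (loopB s.toList [.P [] d]).map (fun it => String.mk (bitemStr it)) =
      ((loopB s.toList [.P [] d]).map bitemStr).map String.mk from by
        simp [List.map_map, Function.comp]]
  rw [loopB_sem]
  simp [bsem]
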